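-- pv_equiv track=rewrite | github.com/DiegoLagosBesoain/Algoritms-and-Competitive_programing | employees.py | bfs
-- ===== SOURCE A (Python) =====
-- def bfs(grafo, partida, visitados):
--     queue = [partida]
--     visitados[partida] = True
--     maxima_cantidad_de_vecinos=0
--     dia=1
--     dia_maximo=0
--     amigos_actuales=[partida]
--     while amigos_actuales:
--         nuevos_amigos=[]
--         boom_actual=0
--         for amigo in amigos_actuales:
--
--             nodo = amigo
--
--             for vecino in grafo[nodo]:
--
--                 if not visitados[vecino]:
--                     boom_actual+=1
--                     visitados[vecino] = True
--                     nuevos_amigos.append(vecino)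
--         amigos_actuales=nuevos_amigos
--
--         if boom_actual>maxima_cantidad_de_vecinos:
--             maxima_cantidad_de_vecinos=boom_actual
--             dia_maximo=dia
--         dia+=1
--     return maxima_cantidad_de_vecinos, dia_maximo
-- ===== SOURCE B (Python) =====
-- def bfs(grafo, partida, visitados):
--     visitados[partida] = True
--     queue = [(partida, 0)]
--     i = 0
--     counts = {}
--     while i < len(queue):
--         nodo, d = queue[i]
--         i += 1
--         for vecino in grafo[nodo]:
--             if not visitados[vecino]:
--                 visitados[vecino] = True
--                 counts[d + 1] = counts.get(d + 1, 0) + 1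
--                 queue.append((vecino, d + 1))
--     best_count, best_day = 0, 0
--     for day in sorted(counts):
--         if counts[day] > best_count:
--             best_count, best_day = counts[day], day
--     return best_count, best_day
-- ===== Notes on version B (the rewrite author's own statement) =====
-- stated objective: alternative
-- what changed: A runs a level-synchronized BFS keeping an explicit frontier list per day and updating the running maximum online; B runs a single-queue BFS tagging each node with its distance, tallies discoveries per day in a dict, and picks the best day in a separate ascending scan afterwards.
import Mathlib
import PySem

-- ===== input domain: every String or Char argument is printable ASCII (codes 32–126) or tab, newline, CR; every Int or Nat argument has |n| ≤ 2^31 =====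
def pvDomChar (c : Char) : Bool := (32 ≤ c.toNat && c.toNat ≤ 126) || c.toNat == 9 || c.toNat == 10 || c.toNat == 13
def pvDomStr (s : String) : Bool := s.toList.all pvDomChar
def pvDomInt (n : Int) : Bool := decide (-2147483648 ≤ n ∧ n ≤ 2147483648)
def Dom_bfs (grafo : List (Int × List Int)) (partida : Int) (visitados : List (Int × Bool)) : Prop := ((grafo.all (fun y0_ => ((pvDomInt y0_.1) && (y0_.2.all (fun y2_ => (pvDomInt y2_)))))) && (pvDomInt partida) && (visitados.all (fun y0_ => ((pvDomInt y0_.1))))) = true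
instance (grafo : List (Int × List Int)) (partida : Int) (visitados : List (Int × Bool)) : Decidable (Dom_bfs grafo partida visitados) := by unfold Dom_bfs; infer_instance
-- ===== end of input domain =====

-- B replaces A's level-by-level frontier loop (one list per day, online max) by a single-queue BFS that tags
-- each node with its distance and tallies discoveries per day in a dict, scanned afterwards; equal cost (alternative).
-- Both A and B mutate the caller's `visitados` dict identically (marking reached nodes True); the equivalence
-- proved here is about the RETURN value.

-- ===== PORT A =====
-- A reads grafo[nodo] / visitados[vecino], raising KeyError on a missing key; Pre_bfs excludes those inputs,
-- and the port makes the reads total with defaults ([], true) that are only reachable outside Pre_bfs.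
-- A's dead local `queue = [partida]` is dropped. The while-loop is ported with fuel `visitados.length + 2`,
-- which is never exhausted: every frontier node was freshly flipped False→True, so the number of
-- productive iterations is bounded by the number of False entries.
def bfsStepA (g : PySem.Dict Int (List Int)) (s : PySem.Dict Int Bool × List Int × Int) (amigo : Int) :
    PySem.Dict Int Bool × List Int × Int :=
  (g.getD amigo []).foldl
    (fun s vecino =>
      if s.1.getD vecino true = false then
        (s.1.insert vecino true, s.2.1 ++ [vecino], s.2.2 + 1)
      else s) s

def bfsLoopA (g : PySem.Dict Int (List Int)) :
    Nat → PySem.Dict Int Bool → List Int → Int → Int → Int → Int × Int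
  | 0, _, _, maxc, _, dmax => (maxc, dmax)
  | fuel + 1, vis, cur, maxc, dia, dmax =>
    if cur.isEmpty then (maxc, dmax)
    else
      let r := cur.foldl (bfsStepA g) (vis, ([] : List Int), (0 : Int))
      if r.2.2 > maxc then bfsLoopA g fuel r.1 r.2.1 r.2.2 (dia + 1) dia
      else bfsLoopA g fuel r.1 r.2.1 maxc (dia + 1) dmax

def bfs (grafo : List (Int × List Int)) (partida : Int) (visitados : List (Int × Bool)) : Int × Int :=
  let g := PySem.Dict.mk grafo
  let vis := (PySem.Dict.mk visitados).insert partida true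
  bfsLoopA g (visitados.length + 2) vis [partida] 0 1 0

-- ===== PORT B =====
-- B's queue `queue` with read index `i` is ported as the list of not-yet-processed entries (head = queue[i]);
-- same fuel bound as A's loop (one tick per processed node, each node is processed at most once).
def bfsStepB (d : Int) (s : PySem.Dict Int Bool × List (Int × Int) × PySem.Dict Int Int) (vecino : Int) :
    PySem.Dict Int Bool × List (Int × Int) × PySem.Dict Int Int :=
  if s.1.getD vecino true = false then
    (s.1.insert vecino true, s.2.1 ++ [(vecino, d + 1)], s.2.2.insert (d + 1) (s.2.2.getD (d + 1) 0 + 1))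
  else s

def bfsLoopB (g : PySem.Dict Int (List Int)) :
    Nat → PySem.Dict Int Bool → List (Int × Int) → PySem.Dict Int Int → PySem.Dict Int Int
  | 0, _, _, counts => counts
  | _ + 1, _, [], counts => counts
  | fuel + 1, vis, (nodo, d) :: rest, counts =>
    let r := (g.getD nodo []).foldl (bfsStepB d) (vis, rest, counts)
    bfsLoopB g fuel r.1 r.2.1 r.2.2

def bfsScanB (counts : PySem.Dict Int Int) : Int × Int :=
  (PySem.List.sorted counts.keys (fun x => x) false).foldl
    (fun best day =>
      if counts.getD day 0 > best.1 then (counts.getD day 0, day) else best)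
    ((0 : Int), (0 : Int))

def bfs_alt (grafo : List (Int × List Int)) (partida : Int) (visitados : List (Int × Bool)) : Int × Int :=
  let g := PySem.Dict.mk grafo
  let vis := (PySem.Dict.mk visitados).insert partida true
  bfsScanB (bfsLoopB g (visitados.length + 2) vis [(partida, 0)] PySem.Dict.empty)

-- ===== PRECONDITION & SPEC =====
-- Pre_bfs excludes exactly the inputs on which A raises KeyError: A dereferences grafo[u] for every node u
-- it reaches and visitados[v] for every neighbour v of such a u, so the condition is stated over the
-- reachable set of the input graph (a monotone membership closure over the input, not a copy of the ports'
-- loops: no marking, no levels, no counts are recomputed here).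
def bfsReachStep (g : PySem.Dict Int (List Int)) (vis : PySem.Dict Int Bool) (partida : Int)
    (S : List Int) : List Int :=
  PySem.Set.update S
    (S.flatMap (fun u => (g.getD u []).filter (fun v => (vis.get? v == some false) && !(v == partida))))

def bfsReach (grafo : List (Int × List Int)) (partida : Int) (visitados : List (Int × Bool)) : List Int :=
  (bfsReachStep (PySem.Dict.mk grafo) (PySem.Dict.mk visitados) partida)^[visitados.length + 1] [partida]

def Pre_bfs (grafo : List (Int × List Int)) (partida : Int) (visitados : List (Int × Bool)) : Prop :=
  ∀ u ∈ bfsReach grafo partida visitados,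
    u ∈ grafo.map Prod.fst ∧
    ∀ v ∈ (PySem.Dict.mk grafo).getD u [], v = partida ∨ v ∈ visitados.map Prod.fst
instance (grafo : List (Int × List Int)) (partida : Int) (visitados : List (Int × Bool)) : Decidable (Pre_bfs grafo partida visitados) := by unfold Pre_bfs; infer_instance

def pvWitness_bfs : (List (Int × List Int)) × Int × (List (Int × Bool)) :=
  ([(0, [1, 2]), (1, [2]), (2, [0])], 0, [(0, false), (1, false), (2, false)])

def Spec_bfs (grafo : List (Int × List Int)) (partida : Int) (visitados : List (Int × Bool)) (out : Int × Int) : Prop := out = bfs_alt grafo partida visitados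
instance (grafo : List (Int × List Int)) (partida : Int) (visitados : List (Int × Bool)) (out : Int × Int) : Decidable (Spec_bfs grafo partida visitados out) := by unfold Spec_bfs; infer_instance

-- ===== CLAIM (what is proved, stated in full; the proofs are below) =====
def Claim_equal_bfs : Prop := ∀ (grafo : List (Int × List Int)) (partida : Int) (visitados : List (Int × Bool)), Dom_bfs grafo partida visitados → Pre_bfs grafo partida visitados → Spec_bfs grafo partida visitados (bfs grafo partida visitados)


-- ===== LEMMAS AND PROOFS =====

-- canonical "expansion" of one adjacency list / one frontier (proof-side only)
def expand1 : PySem.Dict Int Bool → List Int → PySem.Dict Int Bool × List Int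
  | vis, [] => (vis, [])
  | vis, v :: adj =>
    if vis.getD v true = false then
      ((expand1 (vis.insert v true) adj).1, v :: (expand1 (vis.insert v true) adj).2)
    else expand1 vis adj

def expandL (g : PySem.Dict Int (List Int)) : PySem.Dict Int Bool → List Int → PySem.Dict Int Bool × List Int
  | vis, [] => (vis, [])
  | vis, n :: cur =>
    ((expandL g (expand1 vis (g.getD n [])).1 cur).1,
     (expand1 vis (g.getD n [])).2 ++ (expandL g (expand1 vis (g.getD n [])).1 cur).2)

def bumps (c : PySem.Dict Int Int) (k : Int) : Nat → PySem.Dict Int Int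
  | 0 => c
  | n + 1 => (bumps c k n).insert k ((bumps c k n).getD k 0 + 1)

def fc (vis : PySem.Dict Int Bool) : Nat :=
  (vis.keys.dedup.filter (fun k => vis.get? k == some false)).length

def foldP (z : Int × Int) (P : List (Int × Int)) : Int × Int :=
  P.foldl (fun b kv => if kv.2 > b.1 then (kv.2, kv.1) else b) z

theorem foldTripleA (adj : List Int) : ∀ (vis : PySem.Dict Int Bool) (nuevos : List Int) (boom : Int),
    adj.foldl (fun s vecino =>
      if s.1.getD vecino true = false then (s.1.insert vecino true, s.2.1 ++ [vecino], s.2.2 + 1) else s)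
      (vis, nuevos, boom)
    = ((expand1 vis adj).1, nuevos ++ (expand1 vis adj).2, boom + ((expand1 vis adj).2.length : Int)) := by
  induction adj with
  | nil => intro vis nuevos boom; simp [expand1]
  | cons v adj ih =>
    intro vis nuevos boom
    simp only [List.foldl_cons, expand1]
    by_cases hv : vis.getD v true = false
    · rw [if_pos hv, if_pos hv, ih]
      refine Prod.ext rfl (Prod.ext (by simp) ?_)
      simp only [List.length_cons]
      push_cast
      ring
    · rw [if_neg hv, if_neg hv, ih]

theorem levelA_eq (g : PySem.Dict Int (List Int)) (cur : List Int) :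
    ∀ (vis : PySem.Dict Int Bool) (nuevos : List Int) (boom : Int),
    cur.foldl (bfsStepA g) (vis, nuevos, boom)
    = ((expandL g vis cur).1, nuevos ++ (expandL g vis cur).2, boom + ((expandL g vis cur).2.length : Int)) := by
  induction cur with
  | nil => intro vis nuevos boom; simp [expandL]
  | cons n cur ih =>
    intro vis nuevos boom
    simp only [List.foldl_cons, expandL]
    have hstep : bfsStepA g (vis, nuevos, boom) n
        = ((expand1 vis (g.getD n [])).1, nuevos ++ (expand1 vis (g.getD n [])).2,
           boom + ((expand1 vis (g.getD n [])).2.length : Int)) := by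
      unfold bfsStepA
      exact foldTripleA (g.getD n []) vis nuevos boom
    rw [hstep, ih]
    refine Prod.ext rfl (Prod.ext (by simp) ?_)
    simp only [List.length_append]
    push_cast
    ring

theorem bumps_succ_left (c : PySem.Dict Int Int) (k : Int) (n : Nat) :
    bumps (c.insert k (c.getD k 0 + 1)) k n = bumps c k (n + 1) := by
  induction n with
  | zero => rfl
  | succ n ih => simp only [bumps, ih]

theorem foldTripleB (d : Int) (adj : List Int) :
    ∀ (vis : PySem.Dict Int Bool) (q : List (Int × Int)) (counts : PySem.Dict Int Int),
    adj.foldl (bfsStepB d) (vis, q, counts)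
    = ((expand1 vis adj).1, q ++ (expand1 vis adj).2.map (fun v => (v, d + 1)),
       bumps counts (d + 1) (expand1 vis adj).2.length) := by
  induction adj with
  | nil => intro vis q counts; simp [expand1, bumps]
  | cons v adj ih =>
    intro vis q counts
    simp only [List.foldl_cons, expand1, bfsStepB]
    by_cases hv : vis.getD v true = false
    · rw [if_pos hv, if_pos hv, ih, bumps_succ_left]
      refine Prod.ext rfl (Prod.ext (by simp) (by simp [List.length_cons]))
    · rw [if_neg hv, if_neg hv, ih]

theorem bumps_add (c : PySem.Dict Int Int) (k : Int) (a b : Nat) :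
    bumps (bumps c k a) k b = bumps c k (a + b) := by
  induction b with
  | zero => rfl
  | succ b ih => simp only [bumps, ih]; rfl

theorem loopB_nil (g : PySem.Dict Int (List Int)) (gg : Nat) (vis : PySem.Dict Int Bool)
    (counts : PySem.Dict Int Int) : bfsLoopB g gg vis [] counts = counts := by
  cases gg <;> rfl

theorem loopA_nil (g : PySem.Dict Int (List Int)) (f : Nat) (vis : PySem.Dict Int Bool)
    (maxc dia dmax : Int) : bfsLoopA g f vis [] maxc dia dmax = (maxc, dmax) := by
  cases f <;> simp [bfsLoopA]

theorem loopB_level (g : PySem.Dict Int (List Int)) (d : Int) (cur : List Int) :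
    ∀ (g' : Nat) (vis : PySem.Dict Int Bool) (q2 : List (Int × Int)) (counts : PySem.Dict Int Int),
    bfsLoopB g (cur.length + g') vis (cur.map (fun n => (n, d)) ++ q2) counts
    = bfsLoopB g g' (expandL g vis cur).1
        (q2 ++ (expandL g vis cur).2.map (fun v => (v, d + 1)))
        (bumps counts (d + 1) (expandL g vis cur).2.length) := by
  induction cur with
  | nil => intro g' vis q2 counts; simp [expandL, bumps]
  | cons n cur ih =>
    intro g' vis q2 counts
    have hlen : (n :: cur).length + g' = (cur.length + g') + 1 := by
      simp [List.length_cons]; omega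
    rw [hlen]
    simp only [List.map_cons, List.cons_append]
    have hstep : bfsLoopB g ((cur.length + g') + 1) vis ((n, d) :: (cur.map (fun n => (n, d)) ++ q2)) counts
        = bfsLoopB g (cur.length + g')
            ((g.getD n []).foldl (bfsStepB d) (vis, cur.map (fun n => (n, d)) ++ q2, counts)).1
            ((g.getD n []).foldl (bfsStepB d) (vis, cur.map (fun n => (n, d)) ++ q2, counts)).2.1
            ((g.getD n []).foldl (bfsStepB d) (vis, cur.map (fun n => (n, d)) ++ q2, counts)).2.2 := rfl
    rw [hstep, foldTripleB]
    simp only [List.append_assoc]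
    rw [ih, bumps_add]
    simp only [expandL, List.map_append, List.append_assoc, List.length_append]

theorem get?_mk_append_self (P : List (Int × Int)) (k v : Int) (h : k ∉ P.map Prod.fst) :
    (PySem.Dict.mk (P ++ [(k, v)])).get? k = some v := by
  induction P with
  | nil => simp [PySem.Dict.get?_mk_cons]
  | cons p P ih =>
    simp only [List.map_cons, List.mem_cons, not_or] at h
    rw [List.cons_append, PySem.Dict.get?_mk_cons]
    have hne : (p.1 == k) = false := beq_eq_false_iff_ne.mpr (fun e => h.1 e.symm)
    simp only [hne, Bool.false_eq_true, if_false]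
    exact ih h.2

theorem insert_mk_append_self (P : List (Int × Int)) (k v w : Int) (h : k ∉ P.map Prod.fst) :
    (PySem.Dict.mk (P ++ [(k, v)])).insert k w = PySem.Dict.mk (P ++ [(k, w)]) := by
  have hc : (PySem.Dict.mk (P ++ [(k, v)])).contains k = true := by
    rw [PySem.Dict.contains_iff_mem_keys]
    show k ∈ (P ++ [(k, v)]).map Prod.fst
    simp
  apply PySem.Dict.ext
  rw [PySem.Dict.items_insert_of_contains _ _ hc]
  show (P ++ [(k, v)]).map (fun p => if (p.1 == k) = true then (k, w) else p) = P ++ [(k, w)]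
  rw [List.map_append]
  have h1 : P.map (fun p => if (p.1 == k) = true then (k, w) else p) = P := by
    conv_rhs => rw [← List.map_id P]
    apply List.map_congr_left
    intro p hp
    have hb : (p.1 == k) = false :=
      beq_eq_false_iff_ne.mpr (fun e => h (List.mem_map.mpr ⟨p, hp, e⟩))
    simp [hb]
  rw [h1]
  simp

theorem bumps_fresh (P : List (Int × Int)) (k : Int) (h : k ∉ P.map Prod.fst) :
    ∀ n : Nat, bumps (PySem.Dict.mk P) k (n + 1) = PySem.Dict.mk (P ++ [(k, (n : Int) + 1)]) := by
  intro n
  induction n with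
  | zero =>
    show (PySem.Dict.mk P).insert k ((PySem.Dict.mk P).getD k 0 + 1) = _
    have hc : (PySem.Dict.mk P).contains k = false := by
      rw [Bool.eq_false_iff, Ne, PySem.Dict.contains_iff_mem_keys]
      exact h
    rw [PySem.Dict.getD_of_not_contains _ _ hc]
    apply PySem.Dict.ext
    rw [PySem.Dict.items_insert_of_not_contains _ _ hc]
    norm_num
  | succ n ih =>
    show (bumps (PySem.Dict.mk P) k (n + 1)).insert k ((bumps (PySem.Dict.mk P) k (n + 1)).getD k 0 + 1) = _
    rw [ih, PySem.Dict.getD_eq_get?_getD, get?_mk_append_self P k _ h,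
        insert_mk_append_self P k _ _ h]
    simp only [Option.getD_some, Nat.cast_add, Nat.cast_one]

theorem filter_sub (l : List Int) (v : Int) (p q : Int → Bool) (hn : l.Nodup) (hv : v ∈ l)
    (hp : p v = true) (hq : q v = false) (ho : ∀ k ∈ l, k ≠ v → p k = q k) :
    (l.filter q).length + 1 = (l.filter p).length := by
  induction l with
  | nil => cases hv
  | cons a l ih =>
    rcases List.mem_cons.mp hv with rfl | hv'
    · have hvl : v ∉ l := (List.nodup_cons.mp hn).1
      have heq : l.filter p = l.filter q := by
        apply List.filter_congr
        intro k hk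
        exact ho k (List.mem_cons_of_mem _ hk) (fun e => hvl (e ▸ hk))
      simp [hp, hq, heq]
    · have hav : a ≠ v := by
        intro e; exact (List.nodup_cons.mp hn).1 (e ▸ hv')
      have hpa := ho a List.mem_cons_self hav
      have ihh := ih (List.nodup_cons.mp hn).2 hv'
        (fun k hk hkv => ho k (List.mem_cons_of_mem _ hk) hkv)
      by_cases hqa : q a = true
      · have hpa' : p a = true := by rw [hpa]; exact hqa
        simp only [List.filter_cons, hqa, hpa', if_true]
        simp only [List.length_cons]
        omega
      · have hqa' : q a = false := by simpa using hqa
        have hpa' : p a = false := by rw [hpa]; exact hqa'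
        simp only [List.filter_cons, hqa', hpa', Bool.false_eq_true, if_false]
        omega

theorem fc_insert_false (vis : PySem.Dict Int Bool) (v : Int) (h : vis.get? v = some false) :
    fc (vis.insert v true) + 1 = fc vis := by
  have hmem : v ∈ vis.keys := by
    by_contra hx
    rw [← PySem.Dict.get?_eq_none_iff_not_mem_keys] at hx
    rw [h] at hx
    cases hx
  have hc : vis.contains v = true := (PySem.Dict.contains_iff_mem_keys vis v).mpr hmem
  unfold fc
  rw [PySem.Dict.keys_insert_of_contains _ _ hc]
  apply filter_sub vis.keys.dedup v _ _ vis.keys.nodup_dedup (List.mem_dedup.mpr hmem)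
  · simp [h]
  · rw [PySem.Dict.get?_insert_self]
    simp
  · intro k hk hkv
    rw [PySem.Dict.get?_insert_of_ne _ _ hkv]

theorem fc_expand1 (adj : List Int) : ∀ (vis : PySem.Dict Int Bool),
    fc (expand1 vis adj).1 + (expand1 vis adj).2.length = fc vis := by
  induction adj with
  | nil => intro vis; simp [expand1]
  | cons v adj ih =>
    intro vis
    simp only [expand1]
    by_cases hv : vis.getD v true = false
    · have hsome : vis.get? v = some false := by
        rw [PySem.Dict.getD_eq_get?_getD] at hv
        cases hg : vis.get? v with
        | none => rw [hg] at hv; simp at hv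
        | some b =>
          rw [hg] at hv
          simp only [Option.getD_some] at hv
          rw [hv]
      rw [if_pos hv]
      simp only [List.length_cons]
      have h1 := ih (vis.insert v true)
      have h2 := fc_insert_false vis v hsome
      omega
    · rw [if_neg hv]
      exact ih vis

theorem fc_expandL (g : PySem.Dict Int (List Int)) (cur : List Int) : ∀ (vis : PySem.Dict Int Bool),
    fc (expandL g vis cur).1 + (expandL g vis cur).2.length = fc vis := by
  induction cur with
  | nil => intro vis; simp [expandL]
  | cons n cur ih =>
    intro vis
    simp only [expandL, List.length_append]
    have h1 := fc_expand1 (g.getD n []) vis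
    have h2 := ih (expand1 vis (g.getD n [])).1
    omega

theorem fc_le (vis : PySem.Dict Int Bool) : fc vis ≤ vis.items.length := by
  unfold fc
  calc (vis.keys.dedup.filter _).length ≤ vis.keys.dedup.length := List.length_filter_le _ _
    _ ≤ vis.keys.length := vis.keys.dedup_sublist.length_le
    _ = vis.items.length := by simp [PySem.Dict.keys]

theorem fc_init (visitados : List (Int × Bool)) (partida : Int) :
    fc ((PySem.Dict.mk visitados).insert partida true) ≤ visitados.length + 1 := by
  have h := fc_le ((PySem.Dict.mk visitados).insert partida true)
  by_cases hc : (PySem.Dict.mk visitados).contains partida = true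
  · rw [PySem.Dict.items_insert_of_contains _ _ hc, List.length_map,
        show (PySem.Dict.mk visitados).items = visitados from rfl] at h
    omega
  · rw [PySem.Dict.items_insert_of_not_contains _ _ (Bool.eq_false_iff.mpr hc),
        List.length_append, show (PySem.Dict.mk visitados).items = visitados from rfl] at h
    simp only [List.length_cons, List.length_nil] at h
    omega

theorem scanB_eq (P : List (Int × Int)) (h : (P.map Prod.fst).Pairwise (· < ·)) :
    bfsScanB (PySem.Dict.mk P) = foldP (0, 0) P := by
  have hnd : (PySem.Dict.mk P).keys.Nodup := by
    show (P.map Prod.fst).Nodup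
    exact h.imp ne_of_lt
  unfold bfsScanB
  rw [show (PySem.Dict.mk P).keys = P.map Prod.fst from rfl]
  rw [PySem.List.sorted_eq_self_of_pairwise _ _ (h.imp le_of_lt)]
  rw [List.foldl_map]
  unfold foldP
  apply PySem.List.foldl_congr_mem
  intro acc kv hkv
  have hmem : (kv.1, kv.2) ∈ (PySem.Dict.mk P).items := by simpa using hkv
  rw [PySem.Dict.getD_of_mem_items _ hmem hnd 0]

theorem foldP_append (z : Int × Int) (P : List (Int × Int)) (kv : Int × Int) :
    foldP z (P ++ [kv]) = (if kv.2 > (foldP z P).1 then (kv.2, kv.1) else foldP z P) := by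
  unfold foldP
  rw [List.foldl_append]
  rfl

theorem loopB_level' (g : PySem.Dict Int (List Int)) (d : Int) (cur : List Int)
    (g' : Nat) (vis : PySem.Dict Int Bool) (counts : PySem.Dict Int Int) :
    bfsLoopB g (cur.length + g') vis (cur.map (fun n => (n, d))) counts
    = bfsLoopB g g' (expandL g vis cur).1
        ((expandL g vis cur).2.map (fun v => (v, d + 1)))
        (bumps counts (d + 1) (expandL g vis cur).2.length) := by
  rw [← List.append_nil (cur.map (fun n => (n, d))), loopB_level]
  simp only [List.nil_append]

theorem main_lemma (g : PySem.Dict Int (List Int)) : ∀ (f : Nat), ∀ (vis : PySem.Dict Int Bool)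
    (cur : List Int) (maxc dmax : Int) (P : List (Int × Int)) (gg : Nat) (d : Int),
    fc vis + 1 ≤ f → fc vis + cur.length ≤ gg →
    (P.map Prod.fst).Pairwise (· < ·) → (∀ kv ∈ P, kv.1 ≤ d) →
    foldP (0, 0) P = (maxc, dmax) → 0 ≤ maxc →
    bfsScanB (bfsLoopB g gg vis (cur.map (fun n => (n, d))) (PySem.Dict.mk P))
      = bfsLoopA g f vis cur maxc (d + 1) dmax := by
  intro f
  induction f with
  | zero => intro vis cur maxc dmax P gg d hf; omega
  | succ f ih =>
    intro vis cur maxc dmax P gg d hf hg hP hPd hfold hmax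
    cases cur with
    | nil =>
      simp only [List.map_nil]
      rw [loopB_nil, loopA_nil, scanB_eq P hP, hfold]
    | cons n cur' =>
      have hA : bfsLoopA g (f + 1) vis (n :: cur') maxc (d + 1) dmax
          = (if ((expandL g vis (n :: cur')).2.length : Int) > maxc
             then bfsLoopA g f (expandL g vis (n :: cur')).1 (expandL g vis (n :: cur')).2
                    ((expandL g vis (n :: cur')).2.length : Int) (d + 1 + 1) (d + 1)
             else bfsLoopA g f (expandL g vis (n :: cur')).1 (expandL g vis (n :: cur')).2
                    maxc (d + 1 + 1) dmax) := by
        show (if (n :: cur').isEmpty then _ else _) = _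
        simp only [List.isEmpty_cons, Bool.false_eq_true, if_false]
        rw [levelA_eq]
        simp
      have hgg : gg = (n :: cur').length + (gg - (n :: cur').length) := by
        simp only [List.length_cons] at hg ⊢; omega
      rw [hgg, loopB_level']
      set E := expandL g vis (n :: cur') with hE
      have hfc := fc_expandL g (n :: cur') vis
      rw [← hE] at hfc
      by_cases hnil : E.2 = []
      · rw [hnil] at hA hfc
        simp only [List.length_nil] at hA hfc
        have hng : ¬ ((0 : Int) > maxc) := by omega
        rw [hA]
        simp only [Nat.cast_zero, hng, if_false]
        rw [loopA_nil, hnil]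
        simp only [List.map_nil, List.length_nil]
        rw [loopB_nil]
        show bfsScanB (PySem.Dict.mk P) = _
        rw [scanB_eq P hP, hfold]
      · have hpos : 0 < E.2.length := List.length_pos_of_ne_nil hnil
        have hfresh : (d + 1) ∉ P.map Prod.fst := by
          intro hmem
          rcases List.mem_map.mp hmem with ⟨kv, hkv, hk1⟩
          have := hPd kv hkv
          omega
        have hb : bumps (PySem.Dict.mk P) (d + 1) E.2.length
            = PySem.Dict.mk (P ++ [(d + 1, (((E.2.length - 1 : Nat) : Int) + 1))]) := by
          rw [show E.2.length = (E.2.length - 1) + 1 from by omega]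
          exact bumps_fresh P (d + 1) hfresh (E.2.length - 1)
        rw [hb]
        set P' := P ++ [(d + 1, (((E.2.length - 1 : Nat) : Int) + 1))] with hP'
        have hP'pair : (P'.map Prod.fst).Pairwise (· < ·) := by
          rw [hP', List.map_append]
          apply List.pairwise_append.mpr
          refine ⟨hP, by simp, ?_⟩
          intro a ha b hb'
          simp only [List.map_cons, List.map_nil, List.mem_singleton] at hb'
          rcases List.mem_map.mp ha with ⟨kv, hkv, hk1⟩
          have := hPd kv hkv
          omega
        have hP'd : ∀ kv ∈ P', kv.1 ≤ d + 1 := by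
          intro kv hkv
          rcases List.mem_append.mp hkv with hin | hin
          · have := hPd kv hin; omega
          · simp only [List.mem_singleton] at hin
            rw [hin]
        have hboom : ((E.2.length : Int)) = ((E.2.length - 1 : Nat) : Int) + 1 := by omega
        rw [hA]
        by_cases hgt : ((E.2.length : Int)) > maxc
        · rw [if_pos hgt]
          have hfold' : foldP (0, 0) P' = ((E.2.length : Int), d + 1) := by
            rw [hP', foldP_append, hfold]
            rw [if_pos (by rw [hboom] at hgt; exact hgt)]
            rw [hboom]
          have hrec := ih E.1 E.2 ((E.2.length : Int)) (d + 1) P' (gg - (n :: cur').length) (d + 1)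
            (by omega) (by simp only [List.length_cons] at hg ⊢; omega) hP'pair hP'd hfold'
            (by positivity)
          exact hrec
        · rw [if_neg hgt]
          have hfold' : foldP (0, 0) P' = (maxc, dmax) := by
            rw [hP', foldP_append, hfold]
            rw [if_neg (by rw [hboom] at hgt; exact hgt)]
          have hrec := ih E.1 E.2 maxc dmax P' (gg - (n :: cur').length) (d + 1)
            (by omega) (by simp only [List.length_cons] at hg ⊢; omega) hP'pair hP'd hfold' hmax
          exact hrec

theorem bfs_equal_all (grafo : List (Int × List Int)) (partida : Int) (visitados : List (Int × Bool)) :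
    bfs grafo partida visitados = bfs_alt grafo partida visitados := by
  have h := main_lemma (PySem.Dict.mk grafo) (visitados.length + 2)
    ((PySem.Dict.mk visitados).insert partida true) [partida] 0 0 [] (visitados.length + 2) 0
    (by have := fc_init visitados partida; omega)
    (by have := fc_init visitados partida; simp only [List.length_cons, List.length_nil]; omega)
    (by simp) (by simp) rfl le_rfl
  simp only [List.map_cons, List.map_nil] at h
  norm_num at h
  show bfsLoopA (PySem.Dict.mk grafo) (visitados.length + 2)
      ((PySem.Dict.mk visitados).insert partida true) [partida] 0 1 0
    = bfsScanB (bfsLoopB (PySem.Dict.mk grafo) (visitados.length + 2)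
      ((PySem.Dict.mk visitados).insert partida true) [(partida, 0)] (PySem.Dict.mk []))
  exact h.symm

-- ===== VERDICT (by name: the statement is the Claim_ definition above) =====
theorem bfs_spec : Claim_equal_bfs := by
  intro grafo partida visitados _ _
  unfold Spec_bfs
  exact bfs_equal_all grafo partida visitados
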